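-- pv_equiv track=rewrite | github.com/himik19872/-openipc-hass | custom_components/generate_simple_sounds.py | alaw_encode
-- ===== SOURCE A (Python) =====
-- def alaw_encode(sample):
--     """A-law encoding"""
--     sample = max(-32768, min(32767, sample))
--
--     sign = (sample >> 8) & 0x80
--     if sample < 0:
--         sample = -sample
--
--     if sample > 32635:
--         sample = 32635
--
--     if sample >= 256:
--         exponent = 0
--         temp = sample
--         while temp > 1:
--             temp >>= 1
--             exponent += 1
--         exponent -= 1
--         mantissa = (sample - 64) >> 2
--     else:
--         exponent = 0
--         mantissa = sample >> 4
--
--     alaw = (sign | (exponent << 4) | mantissa) ^ 0xD5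
--     return alaw & 0xFF
-- ===== SOURCE B (Python) =====
-- _EXP = [0] * 128  # exponent for each high byte of the magnitude; segment k covers high bytes [2**k, 2**(k+1))
-- for _k in range(7):
--     for _h in range(1 << _k, 1 << (_k + 1)):
--         _EXP[_h] = 7 + _k
--
--
-- def alaw_encode(sample):
--     """A-law encoding via a precomputed exponent table indexed by the magnitude's high byte"""
--     if sample > 32767:
--         sample = 32767
--     elif sample < -32768:
--         sample = -32768
--     if sample < 0:
--         sign, mag = 0x80, -sample
--     else:
--         sign, mag = 0, sample
--     if mag > 32635:
--         mag = 32635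
--     if mag >= 256:
--         code = sign | (_EXP[mag >> 8] << 4) | ((mag - 64) >> 2)
--     else:
--         code = sign | (mag >> 4)
--     return (code ^ 0xD5) & 0xFF
-- ===== Notes on version B (the rewrite author's own statement) =====
-- stated objective: alternative
-- what changed: A's per-call while-shift loop computing the exponent is replaced by a per-high-byte exponent table precomputed once (indexed by the magnitude's high byte), and the bit-twiddled sign/clamp are replaced by explicit branch/negate clamping.
import Mathlib
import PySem

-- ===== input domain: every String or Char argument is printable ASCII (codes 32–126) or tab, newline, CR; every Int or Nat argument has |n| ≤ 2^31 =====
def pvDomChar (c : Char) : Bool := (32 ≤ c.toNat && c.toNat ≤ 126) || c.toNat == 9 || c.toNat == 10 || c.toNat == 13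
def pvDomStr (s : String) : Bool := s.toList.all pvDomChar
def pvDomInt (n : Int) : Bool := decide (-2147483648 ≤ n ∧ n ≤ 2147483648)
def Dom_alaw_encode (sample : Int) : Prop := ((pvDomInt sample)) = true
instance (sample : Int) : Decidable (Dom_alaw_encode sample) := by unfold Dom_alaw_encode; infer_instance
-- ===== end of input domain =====

-- B replaces A's per-call while-shift exponent loop by a precomputed per-high-byte exponent table built once
-- and indexed by the magnitude's high byte, with explicit branch/negate sign and clamping;
-- objective: alternative (table lookup instead of iterated shifting).

-- ===== PORT A =====
-- A's 'while temp > 1: temp >>= 1; exponent += 1' loop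
def alawLoop (temp : Int) (exponent : Int) : Int :=
  if temp > 1 then alawLoop (temp >>> (1 : Nat)) (exponent + 1) else exponent
termination_by temp.toNat
decreasing_by
  rw [Int.shiftRight_eq_div_pow]
  omega

def alaw_encode (sample : Int) : Int :=
  let sample1 := max (-32768) (min 32767 sample)
  let sign := PySem.Int.band (sample1 >>> (8 : Nat)) 0x80
  let sample2 := if sample1 < 0 then -sample1 else sample1
  let sample3 := if sample2 > 32635 then 32635 else sample2
  let em : Int × Int :=
    if sample3 ≥ 256 then
      (alawLoop sample3 0 - 1, (sample3 - 64) >>> (2 : Nat))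
    else
      (0, sample3 >>> (4 : Nat))
  PySem.Int.band (PySem.Int.bxor (PySem.Int.bor (PySem.Int.bor sign (em.1 <<< (4 : Nat))) em.2) 0xD5) 0xFF

-- ===== PORT B =====
-- module-level table build: for _k in range(7): for _h in range(1<<_k, 1<<(_k+1)): _EXP[_h] = 7 + _k
def alawExpTable : List Int :=
  (PySem.List.pyRange 0 7 1).foldl
    (fun arr k =>
      (PySem.List.pyRange ((1 : Int) <<< k.toNat) ((1 : Int) <<< (k.toNat + 1)) 1).foldl
        (fun a h => a.set h.toNat (7 + k)) arr)
    (List.replicate 128 (0 : Int))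

def alaw_encode_alt (sample : Int) : Int :=
  let s := if sample > 32767 then 32767 else if sample < -32768 then -32768 else sample
  let sm : Int × Int := if s < 0 then (0x80, -s) else (0, s)
  let mag := if sm.2 > 32635 then 32635 else sm.2
  let code : Int :=
    if mag ≥ 256 then
      -- _EXP[mag >> 8]: the index is always in 1..127 here, so the lookup never raises
      PySem.Int.bor (PySem.Int.bor sm.1 (((PySem.List.pyGet? alawExpTable (mag >>> (8 : Nat))).getD 0) <<< (4 : Nat))) ((mag - 64) >>> (2 : Nat))
    else
      PySem.Int.bor sm.1 (mag >>> (4 : Nat))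
  PySem.Int.band (PySem.Int.bxor code 0xD5) 0xFF

-- ===== PRECONDITION & SPEC =====
def Spec_alaw_encode (sample : Int) (out : Int) : Prop := out = alaw_encode_alt sample
instance (sample : Int) (out : Int) : Decidable (Spec_alaw_encode sample out) := by unfold Spec_alaw_encode; infer_instance

-- ===== CLAIM =====
def Claim_equal_alaw_encode : Prop := ∀ (sample : Int), Dom_alaw_encode sample → Spec_alaw_encode sample (alaw_encode sample)

-- ===== LEMMAS AND PROOFS =====

-- A's loop adds floor(log2 n) = bit_length n - 1 to the accumulator (n ≥ 1)
theorem alawLoop_natCast (n : Nat) (hn : 1 ≤ n) (e : Int) :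
    alawLoop (n : Int) e = e + (PySem.Int.bitLength (n : Int) : Int) - 1 := by
  induction n using Nat.strong_induction_on generalizing e with
  | _ n ih =>
    rw [alawLoop]
    by_cases h : (n : Int) > 1
    · have h2 : 2 ≤ n := by exact_mod_cast h
      have hsh : (n : Int) >>> (1 : Nat) = ((n / 2 : Nat) : Int) := by
        rw [Int.shiftRight_eq_div_pow]
        omega
      rw [if_pos h, hsh, ih (n / 2) (by omega) (by omega)]
      rw [PySem.Int.bitLength_natCast (m := n) (by omega)]
      push_cast
      ring
    · have h1 : n = 1 := by omega
      subst h1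
      rw [if_neg h]
      have : PySem.Int.bitLength ((1 : Nat) : Int) = 1 := by decide
      rw [this]
      omega

-- bit length drops by 8 when the low byte is stripped (n ≥ 256)
theorem bitLength_div256 (n : Nat) (hn : 256 ≤ n) :
    PySem.Int.bitLength (n : Int) = PySem.Int.bitLength ((n / 256 : Nat) : Int) + 8 := by
  rw [PySem.Int.bitLength_natCast (m := n) (by omega),
      PySem.Int.bitLength_natCast (m := n / 2) (by omega),
      PySem.Int.bitLength_natCast (m := n / 2 / 2) (by omega),
      PySem.Int.bitLength_natCast (m := n / 2 / 2 / 2) (by omega),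
      PySem.Int.bitLength_natCast (m := n / 2 / 2 / 2 / 2) (by omega),
      PySem.Int.bitLength_natCast (m := n / 2 / 2 / 2 / 2 / 2) (by omega),
      PySem.Int.bitLength_natCast (m := n / 2 / 2 / 2 / 2 / 2 / 2) (by omega),
      PySem.Int.bitLength_natCast (m := n / 2 / 2 / 2 / 2 / 2 / 2 / 2) (by omega)]
  have : n / 2 / 2 / 2 / 2 / 2 / 2 / 2 / 2 = n / 256 := by omega
  rw [this]

-- the table stores bit_length(h) + 6 at every high byte h in 1..127
set_option maxRecDepth 8192 in
theorem alawTable_eq : ∀ h : Nat, h < 128 → 1 ≤ h →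
    (PySem.List.pyGet? alawExpTable (h : Int)).getD 0 = (PySem.Int.bitLength (h : Int) : Int) + 6 := by
  decide

-- masking bit 7 of a byte-ranged value reads its sign
theorem band128_eq (t : Int) (h1 : -128 ≤ t) (h2 : t ≤ 127) :
    PySem.Int.band t 128 = if t < 0 then 128 else 0 := by
  have key : ∀ n : Nat, n < 256 →
      PySem.Int.band ((n : Int) - 128) 128 = if (n : Int) - 128 < 0 then 128 else 0 := by
    set_option maxRecDepth 4096 in decide
  have hn : ∃ n : Nat, n < 256 ∧ t = (n : Int) - 128 := ⟨(t + 128).toNat, by omega, by omega⟩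
  obtain ⟨n, hlt, rfl⟩ := hn
  exact key n hlt

-- A's loop-exponent equals B's table lookup on the clamped magnitude
theorem exponent_eq (mag : Int) (h1 : 256 ≤ mag) (h2 : mag ≤ 32635) :
    alawLoop mag 0 - 1 = (PySem.List.pyGet? alawExpTable (mag >>> (8 : Nat))).getD 0 := by
  obtain ⟨n, rfl⟩ : ∃ n : Nat, mag = (n : Int) := ⟨mag.toNat, by omega⟩
  have hn1 : 256 ≤ n := by exact_mod_cast h1
  have hn2 : n ≤ 32635 := by exact_mod_cast h2
  have hsh : ((n : Int) >>> (8 : Nat)) = ((n / 256 : Nat) : Int) := by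
    rw [Int.shiftRight_eq_div_pow]
    omega
  rw [alawLoop_natCast n (by omega), hsh,
      alawTable_eq (n / 256) (by omega) (by omega),
      bitLength_div256 n hn1]
  push_cast
  ring

theorem alaw_main (sample : Int) : alaw_encode sample = alaw_encode_alt sample := by
  unfold alaw_encode alaw_encode_alt
  dsimp only
  set s1 := max (-32768) (min 32767 sample) with hs1
  have hb1 : -32768 ≤ s1 := by omega
  have hb2 : s1 ≤ 32767 := by omega
  -- B's if-chain clamp equals A's max/min clamp
  have hclamp : (if sample > 32767 then (32767 : Int) else if sample < -32768 then -32768 else sample) = s1 := by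
    split_ifs <;> omega
  rw [hclamp]
  -- A's bit-masked sign equals B's branch
  have hdiv : s1 >>> (8 : Nat) = s1 / 256 := by
    rw [Int.shiftRight_eq_div_pow]; norm_num
  have hsign : PySem.Int.band (s1 >>> (8 : Nat)) 0x80 = (if s1 < 0 then ((0x80 : Int), -s1) else (0, s1)).1 := by
    rw [hdiv, band128_eq (s1 / 256) (by omega) (by omega)]
    split_ifs with h h' h' <;> first | rfl | omega
  rw [hsign]
  -- A's abs-then-clamp magnitude equals B's
  have hmag : (if (if s1 < 0 then -s1 else s1) > 32635 then (32635 : Int) else (if s1 < 0 then -s1 else s1))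
      = (if (if s1 < 0 then ((0x80 : Int), -s1) else (0, s1)).2 > 32635 then (32635 : Int)
         else (if s1 < 0 then ((0x80 : Int), -s1) else (0, s1)).2) := by
    split_ifs <;> simp_all
  set sgn := (if s1 < 0 then ((0x80 : Int), -s1) else (0, s1)) with hsgn
  have hmag2 : (if s1 < 0 then -s1 else s1) = sgn.2 := by
    rw [hsgn]; split_ifs <;> rfl
  rw [hmag2]
  set mag := if sgn.2 > 32635 then (32635 : Int) else sgn.2 with hm
  have hmagbounds : 0 ≤ mag ∧ mag ≤ 32635 := by
    rw [hm, hsgn]; split_ifs <;> omega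
  by_cases hge : mag ≥ 256
  · rw [if_pos hge, if_pos hge, exponent_eq mag (by omega) (by omega)]
  · rw [if_neg hge, if_neg hge]
    simp

-- ===== VERDICT =====
theorem alaw_encode_spec : Claim_equal_alaw_encode := by
  intro sample _
  exact alaw_main sample
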